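-- pv_equiv track=rewrite | github.com/bharadwajvyadavalli/coding_markdowns | advanced_algorithms_complete.py | square_of_zeroes
-- ===== SOURCE A (Python) =====
-- def square_of_zeroes(matrix):
--     """
--     Square of Zeroes Problem
--
--     Find the largest square of zeroes in a binary matrix.
--
--     Args:
--         matrix: 2D binary matrix where 0 represents zero, 1 represents one
--
--     Returns:
--         Size of the largest square of zeroes (side length)
--
--     Time Complexity: O(N^3) where N is the size of the matrix
--     Space Complexity: O(N^2) for the DP table
--     """
--     if not matrix or not matrix[0]:
--         return 0
--
--     n = len(matrix)
--
--     # Create DP table for consecutive zeros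
--     zeros_right = [[0] * n for _ in range(n)]
--     zeros_below = [[0] * n for _ in range(n)]
--
--     # Fill zeros_right table
--     for i in range(n):
--         count = 0
--         for j in range(n - 1, -1, -1):
--             if matrix[i][j] == 0:
--                 count += 1
--             else:
--                 count = 0
--             zeros_right[i][j] = count
--
--     # Fill zeros_below table
--     for j in range(n):
--         count = 0
--         for i in range(n - 1, -1, -1):
--             if matrix[i][j] == 0:
--                 count += 1
--             else:
--                 count = 0
--             zeros_below[i][j] = count
--
--     # Find largest square
--     max_size = 0
--
--     for i in range(n):
--         for j in range(n):
--             if matrix[i][j] == 0: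
--                 # Try different square sizes
--                 for size in range(1, min(n - i, n - j) + 1):
--                     # Check if we can form a square of this size
--                     if (zeros_right[i][j] >= size and
--                         zeros_below[i][j] >= size and
--                         zeros_right[i + size - 1][j] >= size and
--                         zeros_below[i][j + size - 1] >= size):
--                         max_size = max(max_size, size)
--
--     return max_size
-- ===== SOURCE B (Python) =====
-- def square_of_zeroes(matrix):
--     if not matrix or not matrix[0]:
--         return 0
--     n = len(matrix)
--     best = 0
--     for i in range(n):
--         for j in range(n):
--             if matrix[i][j] == 0:
--                 for size in range(1, min(n - i, n - j) + 1):
--                     top = all(matrix[i][j + t] == 0 for t in range(size))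
--                     bottom = all(matrix[i + size - 1][j + t] == 0 for t in range(size))
--                     left = all(matrix[i + t][j] == 0 for t in range(size))
--                     right = all(matrix[i + t][j + size - 1] == 0 for t in range(size))
--                     if top and bottom and left and right:
--                         best = max(best, size)
--     return best
-- ===== Notes on version B (the rewrite author's own statement) =====
-- stated objective: simpler
-- what changed: Replaced the two precomputed zeros_right/zeros_below run-length DP tables with a direct scan of the four border segments of each candidate square; no auxiliary tables are built. Pre_ excludes ragged matrices (nonempty first row but some row shorter than len(matrix)), on which A raises IndexError.
import Mathlib
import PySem

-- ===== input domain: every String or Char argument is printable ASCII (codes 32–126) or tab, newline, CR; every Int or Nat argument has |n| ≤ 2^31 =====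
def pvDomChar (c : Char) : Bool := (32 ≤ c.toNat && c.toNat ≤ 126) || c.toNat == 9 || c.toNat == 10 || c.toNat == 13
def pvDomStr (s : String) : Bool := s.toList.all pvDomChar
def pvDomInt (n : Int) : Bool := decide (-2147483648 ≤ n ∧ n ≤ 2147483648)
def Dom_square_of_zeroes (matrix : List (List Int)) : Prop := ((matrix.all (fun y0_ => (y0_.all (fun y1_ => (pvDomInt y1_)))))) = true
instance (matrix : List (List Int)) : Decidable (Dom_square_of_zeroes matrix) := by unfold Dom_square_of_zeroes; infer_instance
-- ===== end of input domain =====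

-- B replaces A's two run-length DP tables by a direct scan of the four border segments of
-- each candidate square (simpler, no tables; not faster).

-- ===== PORT A =====
-- The backward count loop "for j in range(n-1,-1,-1): count = count+1 if cell==0 else 0"
-- is ported as the obvious right-to-left structural recursion carrying the same `count`
-- (the head of the already-built suffix).
def runRight : List Int → List Int
  | [] => []
  | x :: xs =>
    let rest := runRight xs
    (if x = 0 then rest.headD 0 + 1 else 0) :: rest

def square_of_zeroes (matrix : List (List Int)) : Int :=
  if matrix = [] ∨ matrix.headD [] = [] then 0
  else
    let n := matrix.length
    -- zeros_right[i] : counts over columns 0..n-1 of row i (row indexed only up to n in Python)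
    let zeros_right := matrix.map (fun r => runRight (r.take n))
    -- zeros_below stored per column j: zeros_below[i][j] = (zb.getD j []).getD i 0
    let zeros_below := (List.range n).map (fun j => runRight (matrix.map (fun r => r.getD j 1)))
    (List.range n).foldl (fun acc i =>
      (List.range n).foldl (fun acc j =>
        if (matrix.getD i []).getD j 1 = 0 then
          (List.range' 1 (min (n - i) (n - j))).foldl (fun acc (size : Nat) =>
            if ((size : Int) ≤ (zeros_right.getD i []).getD j 0 ∧
                (size : Int) ≤ (zeros_below.getD j []).getD i 0 ∧
                (size : Int) ≤ (zeros_right.getD (i + size - 1) []).getD j 0 ∧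
                (size : Int) ≤ (zeros_below.getD (j + size - 1) []).getD i 0) then
              max acc (size : Int)
            else acc) acc
        else acc) acc) 0

-- ===== PORT B =====
def rowZero (m : List (List Int)) (i j cnt : Nat) : Bool :=
  (List.range cnt).all (fun t => (m.getD i []).getD (j + t) 1 == 0)

def colZero (m : List (List Int)) (i j cnt : Nat) : Bool :=
  (List.range cnt).all (fun t => (m.getD (i + t) []).getD j 1 == 0)

def square_of_zeroes_alt (matrix : List (List Int)) : Int :=
  if matrix = [] ∨ matrix.headD [] = [] then 0
  else
    let n := matrix.length
    (List.range n).foldl (fun acc i =>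
      (List.range n).foldl (fun acc j =>
        if (matrix.getD i []).getD j 1 = 0 then
          (List.range' 1 (min (n - i) (n - j))).foldl (fun acc (size : Nat) =>
            if rowZero matrix i j size && rowZero matrix (i + size - 1) j size &&
               colZero matrix i j size && colZero matrix i (j + size - 1) size then
              max acc (size : Int)
            else acc) acc
        else acc) acc) 0

-- ===== PRECONDITION & SPEC =====
-- Pre_ excludes exactly the ragged matrices (nonempty first row, some row shorter than
-- len(matrix)) on which the Python A raises IndexError.
def Pre_square_of_zeroes (matrix : List (List Int)) : Prop :=
  matrix.headD [] = [] ∨ ∀ r ∈ matrix, matrix.length ≤ r.length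
instance (matrix : List (List Int)) : Decidable (Pre_square_of_zeroes matrix) := by
  unfold Pre_square_of_zeroes; infer_instance

def pvWitness_square_of_zeroes : List (List Int) := [[0, 0, 1], [0, 1, 0], [0, 0, 0]]

def Spec_square_of_zeroes (matrix : List (List Int)) (out : Int) : Prop := out = square_of_zeroes_alt matrix
instance (matrix : List (List Int)) (out : Int) : Decidable (Spec_square_of_zeroes matrix out) := by unfold Spec_square_of_zeroes; infer_instance

-- ===== CLAIM (what is proved, stated in full; the proofs are below) =====
def Claim_equal_square_of_zeroes : Prop := ∀ (matrix : List (List Int)), Dom_square_of_zeroes matrix → Pre_square_of_zeroes matrix → Spec_square_of_zeroes matrix (square_of_zeroes matrix)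

-- ===== LEMMAS AND PROOFS =====

theorem runRight_nonneg (r : List Int) (j : Nat) : 0 ≤ (runRight r).getD j 0 := by
  induction r generalizing j with
  | nil => simp [runRight]
  | cons x xs ih =>
    cases j with
    | zero =>
      simp only [runRight, List.getD_cons_zero]
      split
      · have := ih 0
        have : (0:Int) ≤ (runRight xs).headD 0 := by
          cases h : runRight xs with
          | nil => simp
          | cons a l => have := ih 0; simpa [h] using this
        omega
      · simp
    | succ k => simpa [runRight] using ih k

theorem runRight_getD_rec (r : List Int) (j : Nat) (h : j < r.length) :
    (runRight r).getD j 0 =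
      if r.getD j 1 = 0 then (runRight r).getD (j + 1) 0 + 1 else 0 := by
  induction r generalizing j with
  | nil => simp at h
  | cons x xs ih =>
    cases j with
    | zero =>
      simp [runRight, List.getD, List.head?_eq_getElem?]
    | succ k =>
      have hk : k < xs.length := by simpa using h
      simpa [runRight] using ih k hk

theorem runRight_ge_iff (r : List Int) (size : Nat) :
    ∀ j, j + size ≤ r.length →
    (((size : Int) ≤ (runRight r).getD j 0) ↔ ∀ t < size, r.getD (j + t) 1 = 0) := by
  induction size with
  | zero =>
    intro j _
    refine ⟨fun _ t ht => absurd ht (by omega), fun _ => ?_⟩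
    simpa using runRight_nonneg r j
  | succ s ih =>
    intro j h
    have hj : j < r.length := by omega
    rw [runRight_getD_rec r j hj]
    by_cases hz : r.getD j 1 = 0
    · rw [if_pos hz]
      have ih' := ih (j + 1) (by omega)
      constructor
      · intro hle t ht
        cases t with
        | zero => simpa using hz
        | succ u =>
          have : (s : Int) ≤ (runRight r).getD (j + 1) 0 := by push_cast at hle ⊢; omega
          have := (ih'.mp this) u (by omega)
          simpa [Nat.add_comm, Nat.add_assoc, Nat.add_left_comm] using this
      · intro hall
        have : ∀ t < s, r.getD (j + 1 + t) 1 = 0 := by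
          intro t ht
          have := hall (t + 1) (by omega)
          simpa [Nat.add_comm, Nat.add_assoc, Nat.add_left_comm] using this
        have := ih'.mpr this
        push_cast; omega
    · rw [if_neg hz]
      constructor
      · intro hle; exfalso; push_cast at hle; omega
      · intro hall; exact absurd (by simpa using hall 0 (by omega)) hz

theorem getD_map_lt {α β : Type} (f : α → β) (l : List α) (i : Nat) (d : β) (dl : α)
    (h : i < l.length) : (l.map f).getD i d = f (l.getD i dl) := by
  rw [List.getD_eq_getElem _ _ (by simpa using h), List.getD_eq_getElem _ _ h,
    List.getElem_map]

theorem getD_range_lt (n : Nat) {β : Type} (f : Nat → β) (i : Nat) (d : β) (h : i < n) :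
    ((List.range n).map f).getD i d = f i := by
  rw [getD_map_lt f _ i d 0 (by simpa using h)]
  congr 1
  rw [List.getD_eq_getElem _ _ (by simpa using h), List.getElem_range]

theorem getD_take_lt (r : List Int) (n k : Nat) (hk : k < n) (hn : n ≤ r.length) :
    (r.take n).getD k 1 = r.getD k 1 := by
  have h1 : k < (r.take n).length := by simp; omega
  have h2 : k < r.length := by omega
  rw [List.getD_eq_getElem _ _ h1, List.getD_eq_getElem _ _ h2, List.getElem_take]

theorem rowZero_iff (m : List (List Int)) (i j size : Nat) :
    rowZero m i j size = true ↔ ∀ t < size, (m.getD i []).getD (j + t) 1 = 0 := by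
  simp [rowZero]

theorem colZero_iff (m : List (List Int)) (i j size : Nat) :
    colZero m i j size = true ↔ ∀ t < size, (m.getD (i + t) []).getD j 1 = 0 := by
  simp [colZero]

-- A's four DP-table tests coincide with B's four border scans, for indices in range.
theorem cond_iff (matrix : List (List Int))
    (hlen : ∀ r ∈ matrix, matrix.length ≤ r.length)
    (i j size : Nat) (hi : i < matrix.length) (hj : j < matrix.length)
    (hs1 : 1 ≤ size) (hs : size ≤ min (matrix.length - i) (matrix.length - j)) :
    (((size : Int) ≤ ((matrix.map (fun r => runRight (r.take matrix.length))).getD i []).getD j 0 ∧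
      (size : Int) ≤ (((List.range matrix.length).map (fun j => runRight (matrix.map (fun r => r.getD j 1)))).getD j []).getD i 0 ∧
      (size : Int) ≤ ((matrix.map (fun r => runRight (r.take matrix.length))).getD (i + size - 1) []).getD j 0 ∧
      (size : Int) ≤ (((List.range matrix.length).map (fun j => runRight (matrix.map (fun r => r.getD j 1)))).getD (j + size - 1) []).getD i 0)
     ↔ (rowZero matrix i j size && rowZero matrix (i + size - 1) j size &&
        colZero matrix i j size && colZero matrix i (j + size - 1) size) = true) := by
  set n := matrix.length with hn
  have hie : i + size ≤ n := by omega
  have hje : j + size ≤ n := by omega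
  have hi2 : i + size - 1 < n := by omega
  have hj2 : j + size - 1 < n := by omega
  -- row characterisation
  have hrow : ∀ i', i' < n →
      (((size : Int) ≤ ((matrix.map (fun r => runRight (r.take n))).getD i' []).getD j 0)
        ↔ rowZero matrix i' j size = true) := by
    intro i' hi'
    have hi'' : i' < matrix.length := by omega
    have hmem : matrix.getD i' [] ∈ matrix := by
      rw [List.getD_eq_getElem _ _ hi'']; exact List.getElem_mem _
    have hrl : n ≤ (matrix.getD i' []).length := hlen _ hmem
    have htk : ((matrix.getD i' []).take n).length = n := by
      rw [List.length_take]; omega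
    rw [getD_map_lt _ _ _ _ [] hi'', runRight_ge_iff _ size j (by rw [htk]; omega), rowZero_iff]
    constructor
    · intro h t ht
      have := h t ht
      rwa [getD_take_lt _ n (j + t) (by omega) hrl] at this
    · intro h t ht
      rw [getD_take_lt _ n (j + t) (by omega) hrl]
      exact h t ht
  -- column characterisation
  have hcol : ∀ j', j' < n →
      (((size : Int) ≤ (((List.range n).map (fun j => runRight (matrix.map (fun r => r.getD j 1)))).getD j' []).getD i 0)
        ↔ colZero matrix i j' size = true) := by
    intro j' hj'
    have hml : (matrix.map (fun r => r.getD j' 1)).length = n := by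
      simp only [List.length_map]; omega
    rw [getD_range_lt n _ j' [] hj', runRight_ge_iff _ size i (by rw [hml]; omega), colZero_iff]
    constructor
    · intro h t ht
      have := h t ht
      rwa [getD_map_lt (fun r => r.getD j' 1) matrix (i + t) 1 [] (by omega)] at this
    · intro h t ht
      rw [getD_map_lt (fun r => r.getD j' 1) matrix (i + t) 1 [] (by omega)]
      exact h t ht
  rw [Bool.and_eq_true, Bool.and_eq_true, Bool.and_eq_true]
  rw [← hrow i hi, ← hrow (i + size - 1) hi2, ← hcol j hj, ← hcol (j + size - 1) hj2]
  tauto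

-- ===== VERDICT (by name: the statement is the Claim_ definition above) =====
theorem square_of_zeroes_spec : Claim_equal_square_of_zeroes := by
  intro matrix _ hpre
  unfold Spec_square_of_zeroes square_of_zeroes square_of_zeroes_alt
  split
  · rfl
  · rename_i hguard
    have hlen : ∀ r ∈ matrix, matrix.length ≤ r.length := by
      rcases hpre with h | h
      · exact absurd (Or.inr h) hguard
      · exact h
    dsimp only
    refine PySem.List.foldl_congr_mem _ _ _ _ ?_
    intro acc i hi
    refine PySem.List.foldl_congr_mem _ _ _ _ ?_
    intro acc j hj
    rw [List.mem_range] at hi hj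
    split
    · refine PySem.List.foldl_congr_mem _ _ _ _ ?_
      intro acc size hsz
      rw [List.mem_range'] at hsz
      obtain ⟨k, hk, hkeq⟩ := hsz
      have h1 : 1 ≤ size := by omega
      have h2 : size ≤ min (matrix.length - i) (matrix.length - j) := by omega
      have hc := cond_iff matrix hlen i j size hi hj h1 h2
      by_cases hA : ((size : Int) ≤ ((matrix.map (fun r => runRight (r.take matrix.length))).getD i []).getD j 0 ∧
          (size : Int) ≤ (((List.range matrix.length).map (fun j => runRight (matrix.map (fun r => r.getD j 1)))).getD j []).getD i 0 ∧
          (size : Int) ≤ ((matrix.map (fun r => runRight (r.take matrix.length))).getD (i + size - 1) []).getD j 0 ∧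
          (size : Int) ≤ (((List.range matrix.length).map (fun j => runRight (matrix.map (fun r => r.getD j 1)))).getD (j + size - 1) []).getD i 0)
      · rw [if_pos hA, if_pos (hc.mp hA)]
      · rw [if_neg hA, if_neg (fun hb => hA (hc.mpr hb))]
    · rfl
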